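/- GENERATED by mk_final_copies.py from the proof of the farm's unit `start_decoder.C11e` (farm:start_decoder.C11e.1: Proof.lean) as the
   re-elaboration sweep compiled it — do not edit. -/
import Vorbis.Spec.Units.start_decoder_C11e
import Vorbis.Spec.Worked.start_decoder_C11e_Lemmas

open X86 X86.User Asan Vorbis Vorbis.Spec Vorbis.Spec.StartDecoder

namespace Vorbis.Spec.start_decoder_C11e

/-- **Segment C11e of `start_decoder`** (0x114c6f … 0x114c9f with the stubs 0x114d58 and 0x114d6f; stb_vorbis_fixed.c 3889 – 3892):
`c11e_walk1` from the join `at_114c6f` to the return `cut156` of setup_temp_malloc (or through `error(f, 20)` to the epilogue), then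
`c11e_walk2` from `cut156` to the head `loop11` of loop 3892 with `j = 0` (or through `error(f, 3)` to the epilogue), glued by
`ReachVia.trans`. -/
theorem c11e_seg : Vorbis.Spec.start_decoder_C11e.Statement := by
  intro Lay hLay μ hμ u₀ hcode hld4 hstm herror g i v hat
  obtain ⟨A, A2, A3, Ai, h⟩ := hat
  -- 0x114c6f → 0x114c91 (`cut156`), or the stub 0x114d58 → 0x113b22
  refine (c11e_walk1 hLay hμ hcode hld4 hstm herror h).trans ?_
  intro w hw
  rcases hw with h156 | herr
  · -- 0x114c91 → 0x114ca3 (`loop11`), or the stub 0x114d6f → 0x113b22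
    obtain ⟨A', A2', A3', Ai', h'⟩ := h156
    exact c11e_walk2 hLay hμ hcode herror h'
  · exact ReachVia.done (Or.inr herr)

end Vorbis.Spec.start_decoder_C11e

/-- The unit `start_decoder.C11e`. -/
theorem Vorbis.Spec.Worked.start_decoder_C11e_ok : Vorbis.Spec.start_decoder_C11e.Statement :=
  Vorbis.Spec.start_decoder_C11e.c11e_seg
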